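-- pv_equiv track=rewrite | github.com/LumaVoice/CompleteCollatzConjecture | figure_tree.py | bfs_inverse_levels
-- ===== SOURCE A (Python) =====
-- from collections import deque
--
-- def preimages_B(y: int, s: int, odd_zero=True):
--     """Bridge B(s): even -> divide by -2; odd -> 3n+s; s ∈ {+1,-1}."""
--     yield -2 * y                            # even preimage (always)
--     if (y - (-2 * s)) % 6 == 0:             # odd preimage condition
--         yield (y - s) // 3
--     if odd_zero and y == s:                 # Odd-Zero convention
--         yield 0
--
-- def preimages_W(y: int, s: int, odd_zero=True):
--     """Wall W(s): even -> divide by +2; odd -> 3n+s."""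
--     yield 2 * y
--     if (y - (-2 * s)) % 6 == 0:
--         yield (y - s) // 3
--     if odd_zero and y == s:
--         yield 0
--
-- def bfs_inverse_levels(s: int, depth: int, op="B"):
--     """Unpruned BFS to given inverse depth. Returns list of levels (values), and map coords."""
--     levels = [[] for _ in range(depth + 1)]
--     seen = set([s])
--     q = deque([(s, 0)])
--     levels[0].append(s)
--     pre = preimages_B if op == "B" else preimages_W
--     while q:
--         y, d = q.popleft()
--         if d >= depth:
--             continue
--         for n in pre(y, s, odd_zero=True):
--             if n in seen:
--                 continue
--             seen.add(n)
--             levels[d + 1].append(n)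
--             q.append((n, d + 1))
--     for d in range(len(levels)):
--         levels[d].sort()
--     return levels, seen
-- ===== SOURCE B (Python) =====
-- def preimages_B(y: int, s: int, odd_zero=True):
--     """Bridge B(s): even -> divide by -2; odd -> 3n+s; s ∈ {+1,-1}."""
--     yield -2 * y
--     if (y - (-2 * s)) % 6 == 0:
--         yield (y - s) // 3
--     if odd_zero and y == s:
--         yield 0
--
-- def preimages_W(y: int, s: int, odd_zero=True):
--     """Wall W(s): even -> divide by +2; odd -> 3n+s."""
--     yield 2 * y
--     if (y - (-2 * s)) % 6 == 0:
--         yield (y - s) // 3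
--     if odd_zero and y == s:
--         yield 0
--
-- def bfs_inverse_levels(s: int, depth: int, op="B"):
--     """Staged-pass pipeline, one stage per depth: flatten all preimages of the
--     frontier, dedupe first occurrences with dict.fromkeys, drop what was seen
--     in one bulk filter, bulk-update seen, and store the level already sorted —
--     no queue, no per-candidate visited branch, no final sorting pass."""
--     pre = preimages_B if op == "B" else preimages_W
--     seen = {s}
--     frontier = [s]
--     levels = [[s]]
--     for _ in range(depth):
--         cands = [n for y in frontier for n in pre(y, s, odd_zero=True)]
--         frontier = [n for n in dict.fromkeys(cands) if n not in seen]
--         seen.update(frontier)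
--         levels.append(sorted(frontier))
--     return levels, seen
-- ===== Notes on version B (the rewrite author's own statement) =====
-- stated objective: alternative
-- what changed: A's (value,depth) FIFO queue with a per-candidate visited test, in-loop level appends and a final sorting pass is replaced by a per-depth staged pipeline: flatten all frontier preimages, dedupe first occurrences with dict.fromkeys, drop previously-seen values in one bulk filter, bulk-update seen, and store each level already sorted.
import Mathlib
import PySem

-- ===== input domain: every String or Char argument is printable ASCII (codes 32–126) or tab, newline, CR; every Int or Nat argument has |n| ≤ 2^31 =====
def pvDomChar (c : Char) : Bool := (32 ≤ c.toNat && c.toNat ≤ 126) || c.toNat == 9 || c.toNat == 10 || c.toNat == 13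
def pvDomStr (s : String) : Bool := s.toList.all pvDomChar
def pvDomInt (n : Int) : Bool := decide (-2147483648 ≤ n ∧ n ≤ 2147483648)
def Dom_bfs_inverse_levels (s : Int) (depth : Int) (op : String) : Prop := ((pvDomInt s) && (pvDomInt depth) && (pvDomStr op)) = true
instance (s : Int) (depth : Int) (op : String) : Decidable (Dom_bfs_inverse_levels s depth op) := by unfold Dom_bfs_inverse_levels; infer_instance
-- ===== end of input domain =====

-- B replaces A's per-candidate visited test, (value,depth) queue and final sorting pass by a
-- staged per-depth pipeline (flatten, first-occurrence dedup, bulk filter, bulk set-update,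
-- levels stored already sorted); same return value, objective: alternative decomposition.

-- ===== PORT A =====
-- preimages_B / preimages_W, the generator materialized as the list of yielded values
-- (odd_zero is always passed True); useB selects between them ('pre = preimages_B if op=="B" else preimages_W').
def pvPreimages (useB : Bool) (y : Int) (s : Int) : List Int :=
  [(if useB then -2 * y else 2 * y)]
    ++ (if PySem.Int.mod (y - (-2 * s)) 6 = 0 then [PySem.Int.floordiv (y - s) 3] else [])
    ++ (if y = s then [(0 : Int)] else [])

-- 'levels[i].extend(xs)' on the nested list (in A always called in range, with xs = [n])
def pvAppendAt : List (List Int) → Nat → List Int → List (List Int)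
  | [], _, _ => []
  | l :: ls, 0, xs => (l ++ xs) :: ls
  | l :: ls, Nat.succ i, xs => l :: pvAppendAt ls i xs

-- inner 'for n in pre(y, s, odd_zero=True)' loop of A: state = (levels, seen, items appended to q)
def pvInnerA (d : Int) (ns : List Int)
    (st : List (List Int) × PySem.Set Int × List (Int × Int)) :
    List (List Int) × PySem.Set Int × List (Int × Int) :=
  ns.foldl (fun st n =>
    if PySem.Set.contains st.2.1 n then st
    else (pvAppendAt st.1 (d + 1).toNat [n], PySem.Set.add st.2.1 n,
          st.2.2 ++ [(n, d + 1)])) st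

-- termination measure for A's while loop: each queue entry (y, d) weighs 4^((depth-d)+1)
def pvW (depth d : Int) : Nat := 4 ^ ((depth - d).toNat + 1)
def pvQMeasure (depth : Int) (q : List (Int × Int)) : Nat := (q.map (fun p => pvW depth p.2)).sum

theorem pvPreimages_length_le (useB : Bool) (y s : Int) : (pvPreimages useB y s).length ≤ 3 := by
  unfold pvPreimages; split_ifs <;> simp

theorem pvInnerA_measure_le (depth d : Int) (ns : List Int)
    (st : List (List Int) × PySem.Set Int × List (Int × Int)) :
    pvQMeasure depth (pvInnerA d ns st).2.2 ≤
      pvQMeasure depth st.2.2 + ns.length * pvW depth (d + 1) := by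
  induction ns generalizing st with
  | nil => simp [pvInnerA]
  | cons n ns ih =>
    simp only [pvInnerA, List.foldl_cons, List.length_cons]
    have hmul : (ns.length + 1) * pvW depth (d + 1) =
        ns.length * pvW depth (d + 1) + pvW depth (d + 1) := by ring
    rw [hmul]
    split_ifs with h
    · have := ih st
      simp only [pvInnerA] at this
      omega
    · have := ih (pvAppendAt st.1 (d + 1).toNat [n], PySem.Set.add st.2.1 n,
        st.2.2 ++ [(n, d + 1)])
      simp only [pvInnerA] at this
      simp only [pvQMeasure, List.map_append, List.sum_append, List.map_cons, List.map_nil,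
        List.sum_cons, List.sum_nil] at this ⊢
      omega

theorem pvQMeasure_cons (depth : Int) (y d : Int) (rest : List (Int × Int)) :
    pvQMeasure depth ((y, d) :: rest) = pvW depth d + pvQMeasure depth rest := by
  simp [pvQMeasure]

theorem pvW_pos (depth d : Int) : 0 < pvW depth d := by
  unfold pvW; positivity

theorem pvStep_weight_lt (depth d : Int) (h : ¬ depth ≤ d) :
    3 * pvW depth (d + 1) < pvW depth d := by
  unfold pvW
  have h1 : (depth - d).toNat = (depth - (d + 1)).toNat + 1 := by omega
  rw [h1, pow_succ]
  have : 0 < 4 ^ ((depth - (d + 1)).toNat + 1) := by positivity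
  omega

-- the while loop of A
def pvLoopA (useB : Bool) (s : Int) (depth : Int)
    (levels : List (List Int)) (seen : PySem.Set Int) (q : List (Int × Int)) :
    List (List Int) × PySem.Set Int :=
  match q with
  | [] => (levels, seen)
  | (y, d) :: rest =>
    if depth ≤ d then pvLoopA useB s depth levels seen rest
    else
      let st := pvInnerA d (pvPreimages useB y s) (levels, seen, [])
      pvLoopA useB s depth st.1 st.2.1 (rest ++ st.2.2)
termination_by pvQMeasure depth q
decreasing_by
  · rw [pvQMeasure_cons]
    have := pvW_pos depth d
    omega
  · rw [pvQMeasure_cons]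
    have h1 := pvInnerA_measure_le depth d (pvPreimages useB y s) (levels, seen, [])
    have h2 := pvPreimages_length_le useB y s
    have h3 := pvStep_weight_lt depth d (by assumption)
    have h4 : (pvPreimages useB y s).length * pvW depth (d + 1) ≤ 3 * pvW depth (d + 1) :=
      Nat.mul_le_mul_right _ h2
    simp only [pvQMeasure, List.map_append, List.sum_append] at h1 ⊢
    simp only [List.map_nil, List.sum_nil] at h1
    omega

def bfs_inverse_levels (s : Int) (depth : Int) (op : String) : List (List Int) × List Int :=
  let levels0 : List (List Int) := List.replicate (depth + 1).toNat []
  let levels1 := pvAppendAt levels0 0 [s]   -- levels[0].append(s)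
  let useB := op == "B"
  let r := pvLoopA useB s depth levels1 (PySem.Set.ofList [s]) [(s, 0)]
  (r.1.map (fun lv => PySem.List.sorted lv (fun x => x) false), r.2)

-- ===== PORT B =====
-- 'for _ in range(depth)' loop of B; per step: cands = flattened preimages of the frontier,
-- frontier' = first-occurrence dedup (dict.fromkeys ↦ PySem.List.dedup) filtered against seen,
-- seen.update(frontier'), levels.append(sorted(frontier')).
def pvLoopB (useB : Bool) (s : Int) :
    Nat → PySem.Set Int → List Int → List (List Int) → List (List Int) × PySem.Set Int
  | 0, seen, _, levels => (levels, seen)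
  | k + 1, seen, frontier, levels =>
    let cands := frontier.flatMap (fun y => pvPreimages useB y s)
    let nxt := (PySem.List.dedup cands).filter (fun n => !(PySem.Set.contains seen n))
    pvLoopB useB s k (PySem.Set.update seen nxt) nxt
      (levels ++ [PySem.List.sorted nxt (fun x => x) false])

def bfs_inverse_levels_alt (s : Int) (depth : Int) (op : String) : List (List Int) × List Int :=
  let useB := op == "B"
  pvLoopB useB s depth.toNat (PySem.Set.ofList [s]) [s] [[s]]

-- ===== PRECONDITION & SPEC =====
-- Pre_ excludes depth < 0, on which A raises IndexError at 'levels[0].append(s)'.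
def Pre_bfs_inverse_levels (s : Int) (depth : Int) (op : String) : Prop := 0 ≤ depth
instance (s : Int) (depth : Int) (op : String) : Decidable (Pre_bfs_inverse_levels s depth op) := by unfold Pre_bfs_inverse_levels; infer_instance
def pvWitness_bfs_inverse_levels : Int × Int × String := (1, 2, "B")

def Spec_bfs_inverse_levels (s : Int) (depth : Int) (op : String) (out : List (List Int) × List Int) : Prop := out = bfs_inverse_levels_alt s depth op
instance (s : Int) (depth : Int) (op : String) (out : List (List Int) × List Int) : Decidable (Spec_bfs_inverse_levels s depth op out) := by unfold Spec_bfs_inverse_levels; infer_instance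

-- ===== CLAIM (what is proved, stated in full; the proofs are below) =====
def Claim_equal_bfs_inverse_levels : Prop := ∀ (s : Int) (depth : Int) (op : String), Dom_bfs_inverse_levels s depth op → Pre_bfs_inverse_levels s depth op → Spec_bfs_inverse_levels s depth op (bfs_inverse_levels s depth op)
-- ===== LEMMAS AND PROOFS =====

-- proof-side replay of A's inner loops, used to bridge A's queue step to B's pipeline step
def pvInnerB (st : PySem.Set Int × List Int) (ns : List Int) : PySem.Set Int × List Int :=
  ns.foldl (fun st n =>
    if PySem.Set.contains st.1 n then st else (PySem.Set.add st.1 n, st.2 ++ [n])) st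

def pvStepB (useB : Bool) (s : Int) (seen : PySem.Set Int) (frontier : List Int) :
    PySem.Set Int × List Int :=
  frontier.foldl (fun st y => pvInnerB st (pvPreimages useB y s)) (seen, [])

-- ordered 'new discoveries' of a candidate list against a seen set
def pvDF (sn : PySem.Set Int) : List Int → List Int
  | [] => []
  | n :: rest =>
    if PySem.Set.contains sn n then pvDF sn rest else n :: pvDF (PySem.Set.add sn n) rest

theorem pvAppendAt_nil_right (lv : List (List Int)) (i : Nat) : pvAppendAt lv i [] = lv := by
  induction lv generalizing i with
  | nil => rfl
  | cons a lv ih => cases i <;> simp [pvAppendAt, ih]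

theorem pvAppendAt_append (lv : List (List Int)) (i : Nat) (xs ys : List Int) :
    pvAppendAt (pvAppendAt lv i xs) i ys = pvAppendAt lv i (xs ++ ys) := by
  induction lv generalizing i with
  | nil => rfl
  | cons a lv ih => cases i <;> simp [pvAppendAt, ih]

theorem pvAppendAt_length (xs : List (List Int)) (y : List Int) (zs : List (List Int))
    (ns : List Int) :
    pvAppendAt (xs ++ y :: zs) xs.length ns = xs ++ (y ++ ns) :: zs := by
  induction xs with
  | nil => rfl
  | cons a xs ih => simp [pvAppendAt, ih]

-- pvInnerB with a non-empty accumulator: seen part unchanged, list part appends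
theorem pvInnerB_acc (ns : List Int) (sn : PySem.Set Int) (acc : List Int) :
    pvInnerB (sn, acc) ns = ((pvInnerB (sn, []) ns).1, acc ++ (pvInnerB (sn, []) ns).2) := by
  induction ns generalizing sn acc with
  | nil => simp [pvInnerB]
  | cons n ns ih =>
    simp only [pvInnerB, List.foldl_cons, List.nil_append]
    split_ifs with h
    · exact ih sn acc
    · simp only [pvInnerB] at ih
      rw [ih (PySem.Set.add sn n) (acc ++ [n]), ih (PySem.Set.add sn n) [n]]
      simp

-- pvStepB with a non-empty accumulator
theorem pvStepB_acc (useB : Bool) (s : Int) (front : List Int) (sn : PySem.Set Int)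
    (acc : List Int) :
    front.foldl (fun st y => pvInnerB st (pvPreimages useB y s)) (sn, acc) =
      ((pvStepB useB s sn front).1, acc ++ (pvStepB useB s sn front).2) := by
  induction front generalizing sn acc with
  | nil => simp [pvStepB]
  | cons y front ih =>
    simp only [pvStepB, List.foldl_cons]
    rw [pvInnerB_acc (pvPreimages useB y s) sn acc, pvInnerB_acc (pvPreimages useB y s) sn []]
    rw [ih, ih]
    simp [pvStepB]

-- A's inner loop in terms of pvInnerB: appends the new values at level d+1 and queues them
theorem pvInnerA_eq (d : Int) (ns : List Int) (lv : List (List Int)) (sn : PySem.Set Int)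
    (ad : List (Int × Int)) :
    pvInnerA d ns (lv, sn, ad) =
      (pvAppendAt lv (d + 1).toNat (pvInnerB (sn, []) ns).2, (pvInnerB (sn, []) ns).1,
        ad ++ ((pvInnerB (sn, []) ns).2).map (fun n => (n, d + 1))) := by
  induction ns generalizing lv sn ad with
  | nil => simp [pvInnerA, pvInnerB, pvAppendAt_nil_right]
  | cons n ns ih =>
    simp only [pvInnerA, pvInnerB, List.foldl_cons, List.nil_append]
    split_ifs with h
    · simpa only [pvInnerA, pvInnerB] using ih lv sn ad
    · simp only [pvInnerA, pvInnerB] at ih ⊢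
      rw [ih (pvAppendAt lv (d + 1).toNat [n]) (PySem.Set.add sn n) (ad ++ [(n, d + 1)])]
      have hacc := pvInnerB_acc ns (PySem.Set.add sn n) [n]
      simp only [pvInnerB] at hacc
      rw [hacc, pvAppendAt_append]
      simp

-- draining the queue once every entry is at final depth
theorem pvLoopA_drain (useB : Bool) (s depth : Int) (front : List Int)
    (lv : List (List Int)) (sn : PySem.Set Int) :
    pvLoopA useB s depth lv sn (front.map (fun y => (y, depth))) = (lv, sn) := by
  induction front with
  | nil => simp [pvLoopA]
  | cons y front ih => rw [List.map_cons, pvLoopA]; simp [ih]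

-- processing one whole frontier at depth d (< depth)
theorem pvLoopA_front (useB : Bool) (s depth : Int) (d : Int) (hd : ¬ depth ≤ d)
    (front next : List Int) (lv : List (List Int)) (sn : PySem.Set Int) :
    pvLoopA useB s depth lv sn
        (front.map (fun y => (y, d)) ++ next.map (fun y => (y, d + 1))) =
      pvLoopA useB s depth
        (pvAppendAt lv (d + 1).toNat (pvStepB useB s sn front).2)
        (pvStepB useB s sn front).1
        ((next ++ (pvStepB useB s sn front).2).map (fun y => (y, d + 1))) := by
  induction front generalizing next lv sn with
  | nil => simp [pvStepB, pvAppendAt_nil_right]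
  | cons y front ih =>
    rw [List.map_cons, List.cons_append, pvLoopA]
    simp only [hd, if_false]
    rw [pvInnerA_eq]
    have hq : ∀ zs : List Int,
        (front.map (fun y => (y, d)) ++ next.map (fun y => (y, d + 1))) ++
          zs.map (fun n => (n, d + 1)) =
        front.map (fun y => (y, d)) ++ (next ++ zs).map (fun y => (y, d + 1)) := by
      intro zs; simp
    simp only [List.nil_append]
    rw [hq, ih]
    have hstep : pvStepB useB s sn (y :: front) =
        ((pvStepB useB s (pvInnerB (sn, []) (pvPreimages useB y s)).1 front).1,
          (pvInnerB (sn, []) (pvPreimages useB y s)).2 ++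
            (pvStepB useB s (pvInnerB (sn, []) (pvPreimages useB y s)).1 front).2) := by
      simp only [pvStepB, List.foldl_cons]
      have hacc := pvStepB_acc useB s front
        (pvInnerB (sn, []) (pvPreimages useB y s)).1 (pvInnerB (sn, []) (pvPreimages useB y s)).2
      rw [Prod.mk.eta] at hacc
      rw [hacc]
      rfl
    rw [hstep]
    simp only [pvAppendAt_append, List.append_assoc]

-- pvStepB is pvInnerB over the flattened candidate list
theorem pvStepB_flat (useB : Bool) (s : Int) (sn : PySem.Set Int) (front : List Int) :
    pvStepB useB s sn front =
      pvInnerB (sn, []) (front.flatMap (fun y => pvPreimages useB y s)) := by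
  suffices h : ∀ (front : List Int) (st : PySem.Set Int × List Int),
      front.foldl (fun st y => pvInnerB st (pvPreimages useB y s)) st =
        pvInnerB st (front.flatMap (fun y => pvPreimages useB y s)) by
    exact h front (sn, [])
  intro front
  induction front with
  | nil => intro st; simp [pvInnerB]
  | cons y front ih =>
    intro st
    rw [List.foldl_cons, ih, List.flatMap_cons]
    simp [pvInnerB, List.foldl_append]

-- pvInnerB computes the set update and the ordered new discoveries
theorem pvInnerB_df (cands : List Int) (sn : PySem.Set Int) (acc : List Int) :
    pvInnerB (sn, acc) cands =
      ((pvDF sn cands).foldl PySem.Set.add sn, acc ++ pvDF sn cands) := by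
  induction cands generalizing sn acc with
  | nil => simp [pvInnerB, pvDF]
  | cons n rest ih =>
    simp only [pvInnerB, pvDF, List.foldl_cons]
    split_ifs with h
    · simpa only [pvInnerB] using ih sn acc
    · simp only [pvInnerB] at ih
      rw [ih (PySem.Set.add sn n) (acc ++ [n])]
      simp

theorem pvContains_iff (sn : PySem.Set Int) (m : Int) :
    PySem.Set.contains sn m = true ↔ m ∈ sn := by
  simp [PySem.Set.contains]

-- every element of pvDF sn cands is outside sn
theorem pvDF_not_mem (cands : List Int) (sn : PySem.Set Int) (m : Int)
    (hm : m ∈ pvDF sn cands) : m ∉ sn := by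
  induction cands generalizing sn with
  | nil => simp [pvDF] at hm
  | cons n rest ih =>
    simp only [pvDF] at hm
    split_ifs at hm with h
    · exact ih sn hm
    · rcases List.mem_cons.mp hm with h1 | h1
      · subst h1; exact fun hmem => h ((pvContains_iff sn m).mpr hmem)
      · exact fun hmem =>
          ih (PySem.Set.add sn n) h1 ((PySem.Set.mem_add sn n m).mpr (Or.inl hmem))

-- pvDF against a larger seen set is the bulk filter of pvDF against a smaller one
theorem pvDF_filter (cands : List Int) (sn sn' : PySem.Set Int)
    (hsub : ∀ m : Int, m ∈ sn' → m ∈ sn) :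
    pvDF sn cands = (pvDF sn' cands).filter (fun n => !(PySem.Set.contains sn n)) := by
  induction cands generalizing sn sn' with
  | nil => simp [pvDF]
  | cons n rest ih =>
    simp only [pvDF]
    by_cases h1 : n ∈ sn'
    · rw [if_pos ((pvContains_iff sn' n).mpr h1), if_pos ((pvContains_iff sn n).mpr (hsub n h1))]
      exact ih sn sn' hsub
    · rw [if_neg (fun hc => h1 ((pvContains_iff sn' n).mp hc))]
      by_cases h2 : n ∈ sn
      · rw [if_pos ((pvContains_iff sn n).mpr h2)]
        rw [List.filter_cons, if_neg (by simp [PySem.Set.contains, h2])]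
        refine ih sn (PySem.Set.add sn' n) ?_
        intro m hm
        rcases (PySem.Set.mem_add sn' n m).mp hm with h | h
        · exact hsub m h
        · subst h; exact h2
      · rw [if_neg (fun hc => h2 ((pvContains_iff sn n).mp hc))]
        rw [List.filter_cons, if_pos (by simp [PySem.Set.contains, h2])]
        congr 1
        rw [ih (PySem.Set.add sn n) (PySem.Set.add sn' n) ?_]
        · refine List.filter_congr ?_
          intro m hm
          have hne : m ≠ n := fun he =>
            pvDF_not_mem rest (PySem.Set.add sn' n) m hm
              ((PySem.Set.mem_add sn' n m).mpr (Or.inr he))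
          by_cases hmm : m ∈ sn
          · simp [PySem.Set.contains, hmm, PySem.Set.mem_add]
          · simp [PySem.Set.contains, hmm, PySem.Set.mem_add, hne]
        · intro m hm
          rcases (PySem.Set.mem_add sn' n m).mp hm with h | h
          · exact (PySem.Set.mem_add sn n m).mpr (Or.inl (hsub m h))
          · exact (PySem.Set.mem_add sn n m).mpr (Or.inr h)

-- first-occurrence dedup (dict.fromkeys) is pvDF from the empty seen set
theorem pvDedup_eq_pvDF (cands : List Int) :
    PySem.List.dedup cands = pvDF PySem.Set.empty cands := by
  have h : ∀ (cands : List Int) (acc : PySem.Set Int),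
      cands.foldl PySem.Set.add acc = acc ++ pvDF acc cands := by
    intro cands
    induction cands with
    | nil => intro acc; simp [pvDF]
    | cons n rest ih =>
      intro acc
      rw [List.foldl_cons, ih]
      simp only [pvDF]
      by_cases h : n ∈ acc
      · rw [if_pos ((pvContains_iff acc n).mpr h)]
        simp [PySem.Set.add, h]
      · rw [if_neg (fun hc => h ((pvContains_iff acc n).mp hc))]
        simp [PySem.Set.add, h]
  rw [PySem.List.dedup_eq_ofList, PySem.Set.ofList_eq_foldl]
  simpa [PySem.Set.empty] using h cands PySem.Set.empty

-- the bridge: A's per-frontier step equals B's staged pipeline step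
theorem pvStepB_pipe (useB : Bool) (s : Int) (sn : PySem.Set Int) (front : List Int) :
    pvStepB useB s sn front =
      (((PySem.List.dedup (front.flatMap (fun y => pvPreimages useB y s))).filter
          (fun n => !(PySem.Set.contains sn n))).foldl PySem.Set.add sn,
        (PySem.List.dedup (front.flatMap (fun y => pvPreimages useB y s))).filter
          (fun n => !(PySem.Set.contains sn n))) := by
  rw [pvStepB_flat, pvInnerB_df]
  rw [pvDF_filter (front.flatMap (fun y => pvPreimages useB y s)) sn PySem.Set.empty
    (by intro m hm; simp [PySem.Set.empty] at hm)]
  rw [pvDedup_eq_pvDF]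
  simp

-- the main simulation: A's queue loop from a padded levels list equals B's pipeline loop
theorem pvLoopA_eq_loopB (useB : Bool) (s depth : Int) (k : Nat) (d : Int)
    (hd : 0 ≤ d) (hk : d + (k : Int) = depth)
    (lvRaw : List (List Int)) (hlen : lvRaw.length = d.toNat + 1)
    (sn : PySem.Set Int) (front : List Int) :
    ((pvLoopA useB s depth (lvRaw ++ List.replicate k []) sn
        (front.map (fun y => (y, d)))).1.map
          (fun lv => PySem.List.sorted lv (fun x => x) false),
     (pvLoopA useB s depth (lvRaw ++ List.replicate k []) sn
        (front.map (fun y => (y, d)))).2) =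
      pvLoopB useB s k sn front (lvRaw.map (fun lv => PySem.List.sorted lv (fun x => x) false)) := by
  induction k generalizing d lvRaw sn front with
  | zero =>
    have : d = depth := by omega
    subst this
    simp [pvLoopA_drain, pvLoopB]
  | succ k ih =>
    have hdlt : ¬ depth ≤ d := by omega
    have h0 : front.map (fun y => (y, d)) =
        front.map (fun y => (y, d)) ++ ([] : List Int).map (fun y => (y, d + 1)) := by simp
    rw [h0, pvLoopA_front useB s depth d hdlt front [] _ sn]
    have hidx : (d + 1).toNat = lvRaw.length := by omega
    have hrep : lvRaw ++ List.replicate (k + 1) ([] : List Int) =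
        lvRaw ++ ([] : List Int) :: List.replicate k [] := by simp [List.replicate_succ]
    rw [hrep, hidx, pvAppendAt_length]
    rw [pvStepB_pipe]
    have := ih (d + 1) (by omega) (by push_cast at hk ⊢; omega)
      (lvRaw ++ [(PySem.List.dedup (front.flatMap (fun y => pvPreimages useB y s))).filter
        (fun n => !(PySem.Set.contains sn n))])
      (by simp [hlen]; omega)
      (((PySem.List.dedup (front.flatMap (fun y => pvPreimages useB y s))).filter
          (fun n => !(PySem.Set.contains sn n))).foldl PySem.Set.add sn)
      ((PySem.List.dedup (front.flatMap (fun y => pvPreimages useB y s))).filter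
          (fun n => !(PySem.Set.contains sn n)))
    simp only [List.nil_append, List.append_assoc, List.singleton_append] at this ⊢
    rw [this]
    conv_rhs => rw [pvLoopB]
    simp [PySem.Set.update]

-- ===== VERDICT (by name: the statement is the Claim_ definition above) =====
theorem bfs_inverse_levels_spec : Claim_equal_bfs_inverse_levels := by
  intro s depth op _ hpre
  unfold Spec_bfs_inverse_levels
  simp only [bfs_inverse_levels, bfs_inverse_levels_alt]
  have hd : 0 ≤ depth := hpre
  have h3 : pvAppendAt (List.replicate (depth + 1).toNat []) 0 [s] =
      [[s]] ++ List.replicate depth.toNat [] := by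
    have h1 : (depth + 1).toNat = depth.toNat + 1 := by omega
    rw [h1, List.replicate_succ]
    rfl
  rw [h3]
  have hq : [((s : Int), (0 : Int))] = ([s].map (fun y => (y, (0 : Int)))) := by simp
  rw [hq]
  have := pvLoopA_eq_loopB (op == "B") s depth depth.toNat 0 (by omega) (by omega) [[s]]
    (by simp) (PySem.Set.ofList [s]) [s]
  have hm : List.map (fun lv => PySem.List.sorted lv (fun x => x) false) [[s]] = [[s]] := by rfl
  rw [hm] at this
  exact this
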